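-- pv_equiv track=rewrite | github.com/devdanzin/cext-review-toolkit | plugins/cext-review-toolkit/scripts/scan_format_strings.py | _count_pyarg_format_args
-- ===== SOURCE A (Python) =====
-- _PYARG_FORMAT_CODES = set("bBhHiIlLnOfdsUySzZpP")
--
-- def _count_pyarg_format_args(fmt: str) -> int | None:
--     """Count the number of C arguments expected by a PyArg format string.
--
--     Returns None if the format string can't be parsed (e.g., contains
--     unknown format codes or complex nested structures).
--     """
--     count = 0
--     i = 0
--     while i < len(fmt):
--         ch = fmt[i]
--         if ch in _PYARG_FORMAT_CODES:
--             count += 1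
--         elif ch == "(":
--             # Tuple: each code inside consumes an arg
--             pass
--         elif ch == ")":
--             pass
--         elif ch == "|":
--             # Optional arguments separator — doesn't consume an arg
--             pass
--         elif ch == "$":
--             # Keyword-only separator
--             pass
--         elif ch == ":":
--             # Function name follows — stop counting
--             break
--         elif ch == ";":
--             # Error message follows — stop counting
--             break
--         elif ch == "#":
--             # Followed by a Py_ssize_t for string length
--             count += 1
--         elif ch == "!":
--             # Used after 'O' for type checking (O! consumes 2 args)
--             count += 1
--         elif ch == "&":
--             # Used after 'O' for converter (O& consumes 2 args)
--             count += 1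
--         elif ch == "e":
--             # Encoded string: 'es', 'et', 'es#', 'et#' consume 2-3 args
--             if i + 1 < len(fmt) and fmt[i + 1] in "st":
--                 count += 2  # encoding + buffer
--                 i += 1
--                 if i + 1 < len(fmt) and fmt[i + 1] == "#":
--                     count += 1  # + length
--                     i += 1
--             else:
--                 return None  # Unknown 'e' usage
--         elif ch in " \t\n":
--             pass  # Whitespace is allowed
--         elif ch == "*":
--             # y*, s*, z*, w* — buffer protocol, consumes 1 Py_buffer
--             pass  # The preceding format code already counted
--         elif ch == "{":
--             # Not a standard format code
--             return None
--         else: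
--             # Unknown format code
--             return None
--         i += 1
--     return count
-- ===== SOURCE B (Python) =====
-- _ONE = "bBhHiIlLnOfdsUySzZpP#!&"
-- _ZERO = "()|$ \t\n*"
--
--
-- def _count_pyarg_format_args(fmt):
--     """The token language (e[st]#? | one-arg code | zero-arg char)* is locally
--     testable: validate the prefix before the first ':'/';' by per-character
--     membership plus adjacent-pair conditions (every 'e' followed by s/t, every
--     't' preceded by 'e'), then return the closed-form count
--     len(prefix) - number of zero-weight characters (the s/t/# consumed by an
--     'e' unit each weigh 1, exactly the unit's 2/3 args)."""
--     body = fmt.split(":")[0].split(";")[0]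
--     if not all(c in _ONE or c in _ZERO or c in "et" for c in body):
--         return None
--     if body[:1] == "t" or body[-1:] == "e":
--         return None
--     for a, b in zip(body, body[1:]):
--         if (a == "e" and b not in "st") or (b == "t" and a != "e"):
--             return None
--     return len(body) - sum(c in _ZERO for c in body)
-- ===== Notes on version B (the rewrite author's own statement) =====
-- stated objective: alternative
-- what changed: Replaces A's index-advancing cursor state machine (15 elif branches, i stepping by 1/2/3) by a declarative characterization: the prefix before the first terminator character is valid iff every character is in a fixed alphabet and two adjacent-pair conditions hold (every encoded-string marker followed by s/t, every t preceded by that marker), and then the count is the closed form len(prefix) minus the number of zero-weight characters.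
import Mathlib
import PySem

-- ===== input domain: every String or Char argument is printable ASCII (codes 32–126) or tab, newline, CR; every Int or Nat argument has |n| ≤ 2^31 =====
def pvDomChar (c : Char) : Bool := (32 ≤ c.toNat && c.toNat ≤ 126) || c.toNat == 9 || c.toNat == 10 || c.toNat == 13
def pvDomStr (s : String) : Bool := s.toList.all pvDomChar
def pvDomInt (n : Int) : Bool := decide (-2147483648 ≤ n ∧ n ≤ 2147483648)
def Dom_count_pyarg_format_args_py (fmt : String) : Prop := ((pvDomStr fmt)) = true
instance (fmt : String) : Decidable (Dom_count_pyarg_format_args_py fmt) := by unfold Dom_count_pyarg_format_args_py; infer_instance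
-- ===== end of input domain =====

-- B replaces A's index-advancing cursor state machine by a local validity test
-- (per-character membership plus adjacent-pair conditions) followed by a
-- closed-form count len(prefix) - #zero-weight chars (objective: alternative).

-- ===== PORT A =====
-- the set _PYARG_FORMAT_CODES
def pvCodes : List Char :=
  ['b','B','h','H','i','I','l','L','n','O','f','d','s','U','y','S','z','Z','p','P']

-- A's while loop: the index i walks forward by 1 (or by 2/3 in the 'e' branch),
-- transcribed as structural recursion on the remaining suffix fmt[i:]
def pvALoop : List Char → Int → Option Int
  | [], count => some count
  | ch :: rest, count =>
    if ch ∈ pvCodes then pvALoop rest (count+1)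
    else if ch = '(' then pvALoop rest count
    else if ch = ')' then pvALoop rest count
    else if ch = '|' then pvALoop rest count
    else if ch = '$' then pvALoop rest count
    else if ch = ':' then some count
    else if ch = ';' then some count
    else if ch = '#' then pvALoop rest (count+1)
    else if ch = '!' then pvALoop rest (count+1)
    else if ch = '&' then pvALoop rest (count+1)
    else if ch = 'e' then
      match rest with
      | c2 :: rest2 =>
        if c2 = 's' ∨ c2 = 't' then
          -- inner i += 1 bumps plus the loop's own i += 1 folded into the suffix consumed
          match rest2 with
          | '#' :: rest3 => pvALoop rest3 (count+3)
          | other => pvALoop other (count+2)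
        else none
      | [] => none
    else if ch = ' ' ∨ ch = '\t' ∨ ch = '\n' then pvALoop rest count
    else if ch = '*' then pvALoop rest count
    else if ch = '{' then none
    else none
termination_by r _ => r.length
decreasing_by all_goals (simp_all <;> omega)

def count_pyarg_format_args_py (fmt : String) : Option Int :=
  pvALoop fmt.toList 0

-- ===== PORT B =====
-- the strings _ONE and _ZERO of Source B
def pvOne : List Char :=
  ['b','B','h','H','i','I','l','L','n','O','f','d','s','U','y','S','z','Z','p','P','#','!','&']
def pvZero : List Char := ['(',')','|','$',' ','\t','\n','*']

-- Source B's per-character membership test: c in _ONE or c in _ZERO or c in "et"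
def pvOk (c : Char) : Bool := decide (c ∈ pvOne) || decide (c ∈ pvZero) || c == 'e' || c == 't'

-- Source B's adjacent-pair failure condition inside the zip loop
def pvBadPair (a b : Char) : Bool :=
  (a == 'e' && !(b == 's' || b == 't')) || (b == 't' && !(a == 'e'))

def count_pyarg_format_args_py_alt (fmt : String) : Option Int :=
  -- body = fmt.split(":")[0].split(";")[0]
  let body := (fmt.toList.takeWhile (fun c => !(c == ':'))).takeWhile (fun c => !(c == ';'))
  if !(body.all pvOk) then none
  else if body.head? == some 't' || body.getLast? == some 'e' then none
  else if (body.zip body.tail).any (fun p => pvBadPair p.1 p.2) then none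
  else some ((body.length : Int) - (body.countP (fun c => decide (c ∈ pvZero)) : Int))

-- ===== PRECONDITION & SPEC =====
def Spec_count_pyarg_format_args_py (fmt : String) (out : Option Int) : Prop := out = count_pyarg_format_args_py_alt fmt
instance (fmt : String) (out : Option Int) : Decidable (Spec_count_pyarg_format_args_py fmt out) := by unfold Spec_count_pyarg_format_args_py; infer_instance

-- ===== CLAIM (what is proved, stated in full; the proofs are below) =====
def Claim_equal_count_pyarg_format_args_py : Prop := ∀ (fmt : String), Dom_count_pyarg_format_args_py fmt → Spec_count_pyarg_format_args_py fmt (count_pyarg_format_args_py fmt)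

-- ===== LEMMAS AND PROOFS =====

-- proof-only tokenizer of the prefix grammar (e[st]#? | one | zero)*: the
-- common refinement of A's cursor loop and B's local test + closed form
def pvBLoop : List Char → Int → Option Int
  | [], total => some total
  | c :: rest, total =>
    if c = 'e' then
      match rest with
      | c2 :: rest2 =>
        if c2 = 's' ∨ c2 = 't' then
          match rest2 with
          | '#' :: rest3 => pvBLoop rest3 (total + 3)
          | other => pvBLoop other (total + 2)
        else none
      | [] => none
    else if c ∈ pvOne then pvBLoop rest (total+1)
    else if c ∈ pvZero then pvBLoop rest total
    else none
termination_by r _ => r.length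
decreasing_by all_goals (simp_all <;> omega)

def pvKeep (c : Char) : Bool := !(c == ':' || c == ';')

-- recursive form of B's validity test: pvVctx prev l = "prev::l is valid from
-- position 1 on", carrying the previous character as context
def pvVctx : Char → List Char → Bool
  | prev, [] => !(prev == 'e')
  | prev, c :: rest => pvOk c && !pvBadPair prev c && pvVctx c rest

def pvV0 : List Char → Bool
  | [] => true
  | c :: rest => pvOk c && !(c == 't') && pvVctx c rest

theorem pvVctx_of_ne (prev : Char) (l : List Char) (h : (prev == 'e') = false) :
    pvVctx prev l = pvV0 l := by
  cases l with
  | nil => simp [pvVctx, pvV0, h]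
  | cons c rest =>
    simp only [pvVctx, pvV0, pvBadPair, h]
    cases hc : (c == 't') <;> simp

-- bridge: B's flat checks (all / getLast? / zip-any) equal the recursive form
theorem pvBridge : ∀ (l : List Char) (prev : Char),
    (l.all pvOk && !((prev :: l).getLast? == some 'e')
      && !(((prev :: l).zip l).any (fun p => pvBadPair p.1 p.2))) = pvVctx prev l := by
  intro l
  induction l with
  | nil => intro prev; simp [pvVctx, List.getLast?]
  | cons c rest ih =>
    intro prev
    have hz : (prev :: c :: rest).zip (c :: rest) = (prev, c) :: ((c :: rest).zip rest) := rfl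
    have hg : (prev :: c :: rest).getLast? = (c :: rest).getLast? := by
      simp [List.getLast?_cons_cons]
    rw [hz, hg]
    simp only [List.all_cons, List.any_cons, pvVctx, ← ih c, Bool.not_or, Bool.and_assoc]
    cases pvOk c <;> cases pvBadPair prev c <;> cases rest.all pvOk <;>
      cases ((c :: rest).getLast? == some 'e') <;>
      cases ((c :: rest).zip rest).any (fun p => pvBadPair p.1 p.2) <;> rfl

theorem pvV0_flat : ∀ (l : List Char),
    (l.all pvOk && !(l.head? == some 't') && !(l.getLast? == some 'e')
      && !((l.zip l.tail).any (fun p => pvBadPair p.1 p.2))) = pvV0 l := by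
  intro l
  cases l with
  | nil => rfl
  | cons c rest =>
    have : (c :: rest).tail = rest := rfl
    rw [this]
    have h := pvBridge rest c
    have hsome : (some c == some 't') = (c == 't') := by simp
    simp only [List.all_cons, List.head?, pvV0, hsome, ← h]
    cases pvOk c <;> cases (c == 't') <;> cases rest.all pvOk <;>
      cases ((c :: rest).getLast? == some 'e') <;>
      cases ((c :: rest).zip rest).any (fun p => pvBadPair p.1 p.2) <;> rfl

-- B's nested ifs as a single guarded value
theorem pvAlt_guard (l : List Char) :
    (if !(l.all pvOk) then none
     else if l.head? == some 't' || l.getLast? == some 'e' then none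
     else if (l.zip l.tail).any (fun p => pvBadPair p.1 p.2) then none
     else some ((l.length : Int) - (l.countP (fun c => decide (c ∈ pvZero)) : Int))) =
      (if pvV0 l then some ((l.length : Int) - (l.countP (fun c => decide (c ∈ pvZero)) : Int))
       else none) := by
  rw [← pvV0_flat l]
  cases h1 : l.all pvOk <;> cases h2 : (l.head? == some 't') <;> cases h3 : (l.getLast? == some 'e') <;>
    cases h4 : (l.zip l.tail).any (fun p => pvBadPair p.1 p.2) <;> simp

theorem pvAlt_eq (fmt : String) :
    count_pyarg_format_args_py_alt fmt =
      (if pvV0 ((fmt.toList.takeWhile (fun c => !(c == ':'))).takeWhile (fun c => !(c == ';'))) then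
         some ((((fmt.toList.takeWhile (fun c => !(c == ':'))).takeWhile (fun c => !(c == ';'))).length : Int)
           - (((fmt.toList.takeWhile (fun c => !(c == ':'))).takeWhile (fun c => !(c == ';'))).countP (fun c => decide (c ∈ pvZero)) : Int))
       else none) := by
  unfold count_pyarg_format_args_py_alt
  exact pvAlt_guard _

-- double takeWhile = takeWhile pvKeep
theorem pvTake_eq (l : List Char) :
    (l.takeWhile (fun c => !(c == ':'))).takeWhile (fun c => !(c == ';')) = l.takeWhile pvKeep := by
  induction l with
  | nil => rfl
  | cons c rest ih =>
    by_cases h1 : c = ':'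
    · subst h1; rfl
    · by_cases h2 : c = ';'
      · subst h2; rfl
      · have k : pvKeep c = true := by simp [pvKeep, h1, h2]
        rw [List.takeWhile_cons_of_pos (by simp [h1]), List.takeWhile_cons_of_pos (by simp [h2]),
          List.takeWhile_cons_of_pos k, ih]

-- ===== machinery relating A's cursor loop to the tokenizer (from the prefix) =====

inductive PvStep where
  | go (d : Int)
  | stop
  | ebr
  | bad
deriving DecidableEq, Repr

def pvAClass (ch : Char) : PvStep :=
  if ch ∈ pvCodes then .go 1
  else if ch = '(' then .go 0
  else if ch = ')' then .go 0
  else if ch = '|' then .go 0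
  else if ch = '$' then .go 0
  else if ch = ':' then .stop
  else if ch = ';' then .stop
  else if ch = '#' then .go 1
  else if ch = '!' then .go 1
  else if ch = '&' then .go 1
  else if ch = 'e' then .ebr
  else if ch = ' ' ∨ ch = '\t' ∨ ch = '\n' then .go 0
  else if ch = '*' then .go 0
  else if ch = '{' then .bad
  else .bad

def pvBClass (c : Char) : PvStep :=
  if c = 'e' then .ebr
  else if c ∈ pvOne then .go 1
  else if c ∈ pvZero then .go 0
  else .bad

theorem pvCodes_sub {c : Char} (h : c ∈ pvCodes) : c ∈ pvOne := by
  simp only [pvCodes, pvOne] at *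
  simp at h ⊢
  tauto

theorem pvClass_eq (c : Char) (hk : pvKeep c = true) : pvAClass c = pvBClass c := by
  by_cases h1 : c ∈ pvOne
  · simp only [pvOne] at h1
    simp at h1
    rcases h1 with rfl|rfl|rfl|rfl|rfl|rfl|rfl|rfl|rfl|rfl|rfl|rfl|rfl|rfl|rfl|rfl|rfl|rfl|rfl|rfl|rfl|rfl|rfl <;> decide
  · by_cases h2 : c ∈ pvZero
    · simp only [pvZero] at h2
      simp at h2
      rcases h2 with rfl|rfl|rfl|rfl|rfl|rfl|rfl|rfl <;> decide
    · by_cases h3 : c = 'e'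
      · subst h3; decide
      · have hcode : c ∉ pvCodes := fun hc => h1 (pvCodes_sub hc)
        have n1 : c ≠ '(' := by rintro rfl; exact h2 (by decide)
        have n2 : c ≠ ')' := by rintro rfl; exact h2 (by decide)
        have n3 : c ≠ '|' := by rintro rfl; exact h2 (by decide)
        have n4 : c ≠ '$' := by rintro rfl; exact h2 (by decide)
        have n5 : c ≠ ' ' := by rintro rfl; exact h2 (by decide)
        have n6 : c ≠ '\t' := by rintro rfl; exact h2 (by decide)
        have n7 : c ≠ '\n' := by rintro rfl; exact h2 (by decide)
        have n8 : c ≠ '*' := by rintro rfl; exact h2 (by decide)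
        have n9 : c ≠ '#' := by rintro rfl; exact h1 (by decide)
        have n10 : c ≠ '!' := by rintro rfl; exact h1 (by decide)
        have n11 : c ≠ '&' := by rintro rfl; exact h1 (by decide)
        have n12 : c ≠ ':' := by rintro rfl; simp [pvKeep] at hk
        have n13 : c ≠ ';' := by rintro rfl; simp [pvKeep] at hk
        simp [pvAClass, pvBClass, hcode, h1, h2, h3, n1, n2, n3, n4, n5, n6, n7, n8, n9, n10, n11, n12, n13]

theorem pvKeep_false {c : Char} (h : pvKeep c = false) : c = ':' ∨ c = ';' := by
  simp [pvKeep] at h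
  tauto

theorem pvALoop_nil (count : Int) : pvALoop [] count = some count := by
  rw [pvALoop.eq_def]

theorem pvBLoop_nil (total : Int) : pvBLoop [] total = some total := by
  rw [pvBLoop.eq_def]

theorem pvALoop_step (ch : Char) (rest : List Char) (count : Int) :
    pvALoop (ch :: rest) count =
      match pvAClass ch with
      | .go d => pvALoop rest (count + d)
      | .stop => some count
      | .bad => none
      | .ebr =>
          match rest with
          | c2 :: rest2 =>
            if c2 = 's' ∨ c2 = 't' then
              match rest2 with
              | '#' :: rest3 => pvALoop rest3 (count+3)
              | other => pvALoop other (count+2)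
            else none
          | [] => none := by
  rw [pvALoop.eq_def]
  unfold pvAClass
  by_cases c1 : ch ∈ pvCodes
  · simp only [if_pos c1]
  by_cases c2 : ch = '('
  · simp only [if_neg c1, if_pos c2, add_zero]
  by_cases c3 : ch = ')'
  · simp only [if_neg c1, if_neg c2, if_pos c3, add_zero]
  by_cases c4 : ch = '|'
  · simp only [if_neg c1, if_neg c2, if_neg c3, if_pos c4, add_zero]
  by_cases c5 : ch = '$'
  · simp only [if_neg c1, if_neg c2, if_neg c3, if_neg c4, if_pos c5, add_zero]
  by_cases c6 : ch = ':'
  · simp only [if_neg c1, if_neg c2, if_neg c3, if_neg c4, if_neg c5, if_pos c6]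
  by_cases c7 : ch = ';'
  · simp only [if_neg c1, if_neg c2, if_neg c3, if_neg c4, if_neg c5, if_neg c6, if_pos c7]
  by_cases c8 : ch = '#'
  · simp only [if_neg c1, if_neg c2, if_neg c3, if_neg c4, if_neg c5, if_neg c6, if_neg c7, if_pos c8]
  by_cases c9 : ch = '!'
  · simp only [if_neg c1, if_neg c2, if_neg c3, if_neg c4, if_neg c5, if_neg c6, if_neg c7, if_neg c8, if_pos c9]
  by_cases c10 : ch = '&'
  · simp only [if_neg c1, if_neg c2, if_neg c3, if_neg c4, if_neg c5, if_neg c6, if_neg c7, if_neg c8, if_neg c9, if_pos c10]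
  by_cases c11 : ch = 'e'
  · simp only [if_neg c1, if_neg c2, if_neg c3, if_neg c4, if_neg c5, if_neg c6, if_neg c7, if_neg c8, if_neg c9, if_neg c10, if_pos c11]
  by_cases c12 : ch = ' ' ∨ ch = '\t' ∨ ch = '\n'
  · simp only [if_neg c1, if_neg c2, if_neg c3, if_neg c4, if_neg c5, if_neg c6, if_neg c7, if_neg c8, if_neg c9, if_neg c10, if_neg c11, if_pos c12, add_zero]
  by_cases c13 : ch = '*'
  · simp only [if_neg c1, if_neg c2, if_neg c3, if_neg c4, if_neg c5, if_neg c6, if_neg c7, if_neg c8, if_neg c9, if_neg c10, if_neg c11, if_neg c12, if_pos c13, add_zero]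
  by_cases c14 : ch = '{'
  · simp only [if_neg c1, if_neg c2, if_neg c3, if_neg c4, if_neg c5, if_neg c6, if_neg c7, if_neg c8, if_neg c9, if_neg c10, if_neg c11, if_neg c12, if_neg c13, if_pos c14]
  simp only [if_neg c1, if_neg c2, if_neg c3, if_neg c4, if_neg c5, if_neg c6, if_neg c7, if_neg c8, if_neg c9, if_neg c10, if_neg c11, if_neg c12, if_neg c13, if_neg c14]

theorem pvBLoop_step (c : Char) (rest : List Char) (total : Int) :
    pvBLoop (c :: rest) total =
      match pvBClass c with
      | .go d => pvBLoop rest (total + d)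
      | .stop => some total
      | .bad => none
      | .ebr =>
          match rest with
          | c2 :: rest2 =>
            if c2 = 's' ∨ c2 = 't' then
              match rest2 with
              | '#' :: rest3 => pvBLoop rest3 (total+3)
              | other => pvBLoop other (total+2)
            else none
          | [] => none := by
  rw [pvBLoop.eq_def]
  unfold pvBClass
  by_cases d1 : c = 'e'
  · simp only [if_pos d1]
  by_cases d2 : c ∈ pvOne
  · simp only [if_neg d1, if_pos d2]
  by_cases d3 : c ∈ pvZero
  · simp only [if_neg d1, if_neg d2, if_pos d3, add_zero]
  simp only [if_neg d1, if_neg d2, if_neg d3]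

theorem pvLoop_eq : ∀ (k : Nat) (r : List Char) (count : Int), r.length ≤ k →
    pvBLoop (r.takeWhile pvKeep) count = pvALoop r count := by
  intro k
  induction k with
  | zero =>
    intro r count hk
    have : r = [] := List.length_eq_zero_iff.mp (by omega)
    subst this
    rw [List.takeWhile_nil, pvALoop_nil, pvBLoop_nil]
  | succ k ih =>
    intro r count hk
    match r with
    | [] => rw [List.takeWhile_nil, pvALoop_nil, pvBLoop_nil]
    | c :: rest =>
      by_cases hc : pvKeep c = true
      · rw [List.takeWhile_cons_of_pos hc, pvALoop_step, pvBLoop_step, pvClass_eq c hc]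
        simp only [List.length_cons] at hk
        cases pvBClass c with
        | go d => simp only []; exact ih rest (count + d) (by omega)
        | stop => rfl
        | bad => rfl
        | ebr =>
          simp only []
          match rest with
          | [] => rw [List.takeWhile_nil]
          | c2 :: rest2 =>
            by_cases hc2 : pvKeep c2 = true
            · rw [List.takeWhile_cons_of_pos hc2]
              simp only []
              by_cases hst : c2 = 's' ∨ c2 = 't'
              · rw [if_pos hst, if_pos hst]
                simp only [List.length_cons] at hk
                match rest2 with
                | [] =>
                  rw [List.takeWhile_nil]
                  simp only []
                  exact ih [] (count + 2) (by omega)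
                | c3 :: rest3 =>
                  by_cases hc3 : pvKeep c3 = true
                  · rw [List.takeWhile_cons_of_pos hc3]
                    by_cases hh : c3 = '#'
                    · subst hh
                      simp only []
                      exact ih rest3 (count + 3) (by simp at hk ⊢; omega)
                    · have e1 : (match c3 :: List.takeWhile pvKeep rest3 with
                          | '#' :: rest3 => pvBLoop rest3 (count+3)
                          | other => pvBLoop other (count+2)) =
                          pvBLoop (c3 :: List.takeWhile pvKeep rest3) (count+2) := by
                        split <;> simp_all
                      have e2 : (match c3 :: rest3 with
                          | '#' :: rest3 => pvALoop rest3 (count+3)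
                          | other => pvALoop other (count+2)) =
                          pvALoop (c3 :: rest3) (count+2) := by
                        split <;> simp_all
                      rw [e1, e2, ← List.takeWhile_cons_of_pos hc3]
                      exact ih (c3 :: rest3) (count + 2) (by simp at hk ⊢; omega)
                  · have e2 : (match c3 :: rest3 with
                        | '#' :: rest3 => pvALoop rest3 (count+3)
                        | other => pvALoop other (count+2)) =
                        pvALoop (c3 :: rest3) (count+2) := by
                      have hne : c3 ≠ '#' := by
                        rcases pvKeep_false (by simpa using hc3) with rfl | rfl <;> decide
                      split <;> simp_all
                    rw [e2, List.takeWhile_cons_of_neg (by simpa using hc3)]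
                    simp only []
                    rw [pvBLoop_nil, pvALoop_step]
                    rcases pvKeep_false (by simpa using hc3) with rfl | rfl <;> rfl
              · rw [if_neg hst, if_neg hst]
            · rcases pvKeep_false (by simpa using hc2) with rfl | rfl <;>
              · rw [List.takeWhile_cons_of_neg (by decide)]
                simp only []
                rw [if_neg (by decide)]
      · rcases pvKeep_false (by simpa using hc) with rfl | rfl <;>
        · rw [List.takeWhile_cons_of_neg (by decide), pvBLoop_nil, pvALoop_step]
          rfl

-- key: the tokenizer equals B's guarded closed form
theorem pvKey : ∀ (k : Nat) (l : List Char) (t : Int), l.length ≤ k →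
    pvBLoop l t =
      (if pvV0 l then some (t + (l.length : Int) - (l.countP (fun c => decide (c ∈ pvZero)) : Int))
       else none) := by
  intro k
  induction k with
  | zero =>
    intro l t hk
    have : l = [] := List.length_eq_zero_iff.mp (by omega)
    subst this
    simp [pvBLoop, pvV0]
  | succ k ih =>
    intro l t hk
    match l with
    | [] => simp [pvBLoop, pvV0]
    | c :: rest =>
      rw [pvBLoop_step]
      simp only [List.length_cons] at hk
      by_cases he : c = 'e'
      · subst he
        have hcl : pvBClass 'e' = .ebr := rfl
        rw [hcl]
        simp only []
        match rest with
        | [] =>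
          have hv : pvV0 ['e'] = false := by decide
          rw [hv]
          simp
        | c2 :: rest2 =>
          simp only []
          by_cases hst : c2 = 's' ∨ c2 = 't'
          · rw [if_pos hst]
            have hok2 : pvOk c2 = true := by rcases hst with rfl | rfl <;> decide
            have hne2 : (c2 == 'e') = false := by rcases hst with rfl | rfl <;> decide
            have hc2z : (decide (c2 ∈ pvZero)) = false := by rcases hst with rfl | rfl <;> decide
            have hbp : pvBadPair 'e' c2 = false := by rcases hst with rfl | rfl <;> decide
            have hoe : pvOk 'e' = true := by decide
            have hez : (decide ('e' ∈ pvZero)) = false := by decide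
            have hhz : (decide ('#' ∈ pvZero)) = false := by decide
            have hv : pvV0 ('e' :: c2 :: rest2) = pvVctx c2 rest2 := by
              simp [pvV0, pvVctx, hok2, hbp, hoe]
            match rest2 with
            | [] =>
              simp only []
              rw [pvBLoop_nil, hv]
              have hvc : pvVctx c2 [] = true := by simp [pvVctx, hne2]
              rw [hvc, if_pos rfl]
              have hcnt : List.countP (fun c => decide (c ∈ pvZero)) ['e', c2] = 0 := by
                simp [hc2z, hez]
              rw [hcnt]
              norm_num
            | c3 :: rest3 =>
              by_cases hh : c3 = '#'
              · subst hh
                simp only []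
                rw [ih rest3 (t+3) (by simp at hk ⊢; omega)]
                have hv2 : pvVctx c2 ('#' :: rest3) = pvV0 rest3 := by
                  have h4 : pvVctx '#' rest3 = pvV0 rest3 := pvVctx_of_ne _ _ (by decide)
                  have h5 : pvOk '#' = true := by decide
                  simp [pvVctx, pvBadPair, hne2, h4, h5]
                rw [hv, hv2]
                by_cases h3 : pvV0 rest3 = true
                · rw [if_pos h3, if_pos h3]
                  congr 1
                  have hcnt : List.countP (fun c => decide (c ∈ pvZero)) ('e' :: c2 :: '#' :: rest3) =
                      List.countP (fun c => decide (c ∈ pvZero)) rest3 := by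
                    simp [hc2z, hez, hhz]
                  rw [hcnt]
                  simp only [List.length_cons]
                  push_cast
                  ring
                · rw [if_neg h3, if_neg h3]
              · have hmatch : (match c3 :: rest3 with
                    | '#' :: rest3 => pvBLoop rest3 (t+3)
                    | other => pvBLoop other (t+2)) = pvBLoop (c3 :: rest3) (t+2) := by
                  split <;> simp_all
                rw [hmatch, ih (c3 :: rest3) (t+2) (by simp at hk ⊢; omega)]
                have hv2 : pvVctx c2 (c3 :: rest3) = pvV0 (c3 :: rest3) :=
                  pvVctx_of_ne _ _ hne2
                rw [hv, hv2]
                by_cases h3 : pvV0 (c3 :: rest3) = true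
                · rw [if_pos h3, if_pos h3]
                  congr 1
                  have hcnt : List.countP (fun c => decide (c ∈ pvZero)) ('e' :: c2 :: c3 :: rest3) =
                      List.countP (fun c => decide (c ∈ pvZero)) (c3 :: rest3) := by
                    simp [hc2z, hez]
                  rw [hcnt]
                  simp only [List.length_cons]
                  push_cast
                  ring
                · rw [if_neg h3, if_neg h3]
          · rw [if_neg hst]
            have hv : pvV0 ('e' :: c2 :: rest2) = false := by
              have hs : (c2 == 's') = false := by
                have : c2 ≠ 's' := fun h => hst (Or.inl h)
                simp [this]
              have ht : (c2 == 't') = false := by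
                have : c2 ≠ 't' := fun h => hst (Or.inr h)
                simp [this]
              have hbp : pvBadPair 'e' c2 = true := by
                simp [pvBadPair, hs, ht]
              simp [pvV0, pvVctx, hbp]
            rw [hv]
            simp
      · have heb : (c == 'e') = false := by simp [he]
        by_cases h1 : c ∈ pvOne
        · have hcl : pvBClass c = .go 1 := by simp [pvBClass, he, h1]
          rw [hcl]
          simp only []
          rw [ih rest (t+1) (by omega)]
          have hok : pvOk c = true := by simp [pvOk, h1]
          have hnt : (c == 't') = false := by
            have hne : c ≠ 't' := by rintro rfl; revert h1; decide
            simp [hne]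
          have hv : pvV0 (c :: rest) = pvV0 rest := by
            simp [pvV0, hok, hnt, pvVctx_of_ne c rest heb]
          rw [hv]
          by_cases h3 : pvV0 rest = true
          · rw [if_pos h3, if_pos h3]
            congr 1
            have hz : (decide (c ∈ pvZero)) = false := by
              have hni : c ∉ pvZero := by
                intro hz; revert h1; fin_cases hz <;> decide
              simp [hni]
            have hcnt : List.countP (fun x => decide (x ∈ pvZero)) (c :: rest) =
                List.countP (fun x => decide (x ∈ pvZero)) rest := by
              simp [hz]
            rw [hcnt]
            simp only [List.length_cons]
            push_cast
            ring
          · rw [if_neg h3, if_neg h3]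
        · by_cases h2 : c ∈ pvZero
          · have hcl : pvBClass c = .go 0 := by simp [pvBClass, he, h1, h2]
            rw [hcl]
            simp only []
            rw [ih rest (t+0) (by omega)]
            have hok : pvOk c = true := by simp [pvOk, h2]
            have hnt : (c == 't') = false := by
              have hne : c ≠ 't' := by rintro rfl; revert h2; decide
              simp [hne]
            have hv : pvV0 (c :: rest) = pvV0 rest := by
              simp [pvV0, hok, hnt, pvVctx_of_ne c rest heb]
            rw [hv]
            by_cases h3 : pvV0 rest = true
            · rw [if_pos h3, if_pos h3]
              congr 1
              have hz : (decide (c ∈ pvZero)) = true := by simp [h2]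
              have hcnt : List.countP (fun x => decide (x ∈ pvZero)) (c :: rest) =
                  List.countP (fun x => decide (x ∈ pvZero)) rest + 1 := by
                simp [hz]
              rw [hcnt]
              simp only [List.length_cons]
              push_cast
              ring
            · rw [if_neg h3, if_neg h3]
          · have hcl : pvBClass c = .bad := by simp [pvBClass, he, h1, h2]
            rw [hcl]
            simp only []
            have hv : pvV0 (c :: rest) = false := by
              by_cases ht : c = 't'
              · subst ht; simp [pvV0]
              · have hok : pvOk c = false := by
                  simp [pvOk, h1, h2, he, ht]
                simp [pvV0, hok]
            rw [hv]
            simp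

-- ===== VERDICT (by name: the statement is the Claim_ definition above) =====
theorem count_pyarg_format_args_py_spec : Claim_equal_count_pyarg_format_args_py := by
  intro fmt _
  unfold Spec_count_pyarg_format_args_py count_pyarg_format_args_py
  rw [pvAlt_eq]
  simp only [pvTake_eq]
  rw [← pvLoop_eq fmt.toList.length fmt.toList 0 (by omega)]
  rw [pvKey (fmt.toList.takeWhile pvKeep).length _ 0 (by omega)]
  by_cases h : pvV0 (fmt.toList.takeWhile pvKeep) = true
  · rw [if_pos h, if_pos h]
    norm_num
  · rw [if_neg h, if_neg h]
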